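-- pv_equiv track=rewrite | github.com/Efficientlyy/AI-Trading-Agent | src/execution/exchange/base.py | standardize_symbol
-- ===== SOURCE A (Python) =====
-- def standardize_symbol(symbol: str) -> str:
--     """Convert a symbol from exchange format to standard format.
--
--     This is the reverse of normalize_symbol.
--
--     Args:
--         symbol: Symbol in exchange format
--
--     Returns:
--         Symbol in standard format (e.g., "BTC/USDT")
--     """
--     # Default implementation (to be overridden if needed)
--     # This implementation assumes symbols are in format like "BTCUSDT"
--     # and tries to find common quote currencies
--     common_quote_currencies = ["USDT", "USD", "BTC", "ETH", "BNB", "BUSD"]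
--
--     for quote in sorted(common_quote_currencies, key=len, reverse=True):
--         if symbol.endswith(quote):
--             base = symbol[:-len(quote)]
--             return f"{base}/{quote}"
--
--     # If no common quote currency found, default to a simple split
--     # This is just a guess and should be overridden in real implementations
--     if len(symbol) > 3:
--         base = symbol[:-4]
--         quote = symbol[-4:]
--         return f"{base}/{quote}"
--
--     return symbol
-- ===== SOURCE B (Python) =====
-- def standardize_symbol(symbol: str) -> str:
--     """Convert a symbol from exchange format to standard BASE/QUOTE format.
--
--     Single right-to-left character scan: incrementally filter the reversed
--     quote currencies against the reversed symbol, remembering the longest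
--     fully matched one (so the longest quote suffix wins automatically).
--     """
--     quotes = ["USDT", "USD", "BTC", "ETH", "BNB", "BUSD"]
--     cands = [q[::-1] for q in quotes]
--     best = 0
--     i = 0
--     for ch in reversed(symbol):
--         cands = [q for q in cands if len(q) > i and q[i] == ch]
--         if not cands:
--             break
--         if any(len(q) == i + 1 for q in cands):
--             best = i + 1
--         i += 1
--     if best:
--         return symbol[:-best] + "/" + symbol[-best:]
--     if len(symbol) > 3:
--         return symbol[:-4] + "/" + symbol[-4:]
--     return symbol
-- ===== Notes on version B (the rewrite author's own statement) =====
-- stated objective: alternative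
-- what changed: Replaced A's sort-then-per-quote endswith scan with a single right-to-left character pass that incrementally filters a candidate set of reversed quote currencies and records the longest fully matched one, so no sorting and no per-quote suffix tests remain.
import Mathlib
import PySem

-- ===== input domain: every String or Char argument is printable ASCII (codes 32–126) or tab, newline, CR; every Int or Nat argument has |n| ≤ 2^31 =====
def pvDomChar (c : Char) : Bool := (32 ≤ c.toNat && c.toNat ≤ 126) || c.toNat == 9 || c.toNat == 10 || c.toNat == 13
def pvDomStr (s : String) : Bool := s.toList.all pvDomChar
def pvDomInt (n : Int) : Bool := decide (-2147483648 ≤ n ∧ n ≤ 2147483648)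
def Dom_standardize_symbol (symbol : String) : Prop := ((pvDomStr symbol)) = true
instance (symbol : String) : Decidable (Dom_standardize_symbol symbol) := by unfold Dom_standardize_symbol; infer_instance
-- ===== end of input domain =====

-- B replaces A's sort-then-per-quote endswith scan by one right-to-left character pass that
-- filters a candidate set of reversed quotes and keeps the longest full match (alternative).

-- ===== PORT A =====
-- the 'for quote in sorted(...)' loop: try each quote in order, else fall through
def pvALoop (symbol : String) : List String → String
  | [] =>
      if PySem.Str.len symbol > 3 then
        PySem.Str.slice symbol none (some (-4)) ++ "/" ++ PySem.Str.slice symbol (some (-4)) none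
      else symbol
  | q :: rest =>
      if PySem.Str.endswith symbol q then
        PySem.Str.slice symbol none (some (-(PySem.Str.len q))) ++ "/" ++ q
      else pvALoop symbol rest

def standardize_symbol (symbol : String) : String :=
  let common_quote_currencies := ["USDT", "USD", "BTC", "ETH", "BNB", "BUSD"]
  pvALoop symbol (PySem.List.sorted common_quote_currencies (fun q => PySem.Str.len q) true)

-- ===== PORT B =====
-- cands = [q[::-1] for q in quotes]
def pvCands0 : List (List Char) :=
  (["USDT", "USD", "BTC", "ETH", "BNB", "BUSD"].map (fun q => q.toList.reverse))

-- the 'for ch in reversed(symbol)' loop, state (i, cands, best)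
def pvBLoop (i : Nat) (cands : List (List Char)) (best : Nat) : List Char → Nat
  | [] => best
  | ch :: rest =>
      let cands' := cands.filter (fun q => decide (i < q.length) && (q.getD i ch == ch))
      if cands'.isEmpty then best
      else pvBLoop (i + 1) cands'
        (if cands'.any (fun q => q.length == i + 1) then i + 1 else best) rest

def standardize_symbol_alt (symbol : String) : String :=
  let best := pvBLoop 0 pvCands0 0 symbol.toList.reverse
  if best ≠ 0 then
    PySem.Str.slice symbol none (some (-(best : Int))) ++ "/" ++
      PySem.Str.slice symbol (some (-(best : Int))) none
  else if PySem.Str.len symbol > 3 then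
    PySem.Str.slice symbol none (some (-4)) ++ "/" ++ PySem.Str.slice symbol (some (-4)) none
  else symbol

-- ===== PRECONDITION & SPEC =====
def Spec_standardize_symbol (symbol : String) (out : String) : Prop := out = standardize_symbol_alt symbol
instance (symbol : String) (out : String) : Decidable (Spec_standardize_symbol symbol out) := by unfold Spec_standardize_symbol; infer_instance

-- ===== CLAIM (what is proved, stated in full; the proofs are below) =====
def Claim_equal_standardize_symbol : Prop := ∀ (symbol : String), Dom_standardize_symbol symbol → Spec_standardize_symbol symbol (standardize_symbol symbol)

-- ===== LEMMAS AND PROOFS =====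

theorem pvBLoop_stop (i : Nat) (cands : List (List Char)) (best : Nat) (l : List Char)
    (h : ∀ q ∈ cands, q.length ≤ i) : pvBLoop i cands best l = best := by
  cases l with
  | nil => rfl
  | cons ch rest =>
    have he : cands.filter (fun q => decide (i < q.length) && (q.getD i ch == ch)) = [] := by
      rw [List.filter_eq_nil_iff]
      intro q hq
      have := h q hq
      simp [Nat.not_lt.mpr this]
    simp only [pvBLoop, he]
    simp

theorem pvBLoop_no_complete (l : List Char) : ∀ (i : Nat) (cands : List (List Char)) (best : Nat),
    (∀ q ∈ cands, l.length + i < q.length) → pvBLoop i cands best l = best := by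
  induction l with
  | nil => intro i cands best _; rfl
  | cons ch rest ih =>
    intro i cands best h
    simp only [pvBLoop]
    have hsub : ∀ q ∈ cands.filter (fun q => decide (i < q.length) && (q.getD i ch == ch)),
        q ∈ cands := fun q hq => List.mem_of_mem_filter hq
    have hany : (cands.filter (fun q => decide (i < q.length) && (q.getD i ch == ch))).any
        (fun q => q.length == i + 1) = false := by
      rw [List.any_eq_false]
      intro q hq
      have := h q (hsub q hq)
      simp at this ⊢
      omega
    rw [hany]
    simp only [Bool.false_eq_true, if_false]
    split_ifs with he
    · rfl
    · exact ih (i + 1) _ best (fun q hq => by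
        have := h q (hsub q hq); simp at this ⊢; omega)

theorem pvBLoop_eval (r : List Char) :
    pvBLoop 0 pvCands0 0 r =
      if ['T','D','S','U'] <+: r then 4
      else if ['D','S','U','B'] <+: r then 4
      else if ['D','S','U'] <+: r then 3
      else if ['C','T','B'] <+: r then 3
      else if ['H','T','E'] <+: r then 3
      else if ['B','N','B'] <+: r then 3
      else 0 := by
  have hshort : ∀ (l : List Char), l.length ≤ 2 → pvBLoop 0 pvCands0 0 l = 0 := by
    intro l hl
    apply pvBLoop_no_complete
    intro q hq
    fin_cases hq <;> simp <;> omega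
  rcases r with _ | ⟨a, _ | ⟨b, _ | ⟨c, _ | ⟨d, rest⟩⟩⟩⟩
  · decide
  · rw [hshort [a] (by simp)]
    simp [List.cons_prefix_cons, List.prefix_nil]
  · rw [hshort [a, b] (by simp)]
    simp [List.cons_prefix_cons, List.prefix_nil]
  · -- r = [a, b, c]
    by_cases hD : ('D':Char) = a
    · subst hD
      by_cases hS : ('S':Char) = b
      · subst hS
        by_cases hU : ('U':Char) = c
        · subst hU
          simp [pvBLoop, pvCands0, List.filter, List.cons_prefix_cons, List.prefix_nil]
        · have hU' : (('U':Char) == c) = false := by simp [hU]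
          simp [pvBLoop, pvCands0, List.filter, List.cons_prefix_cons, List.prefix_nil, hU, hU']
      · have hS' : (('S':Char) == b) = false := by simp [hS]
        simp [pvBLoop, pvCands0, List.filter, List.cons_prefix_cons, List.prefix_nil, hS, hS']
    · have hD' : (('D':Char) == a) = false := by simp [hD]
      by_cases hC : ('C':Char) = a
      · subst hC
        by_cases hT : ('T':Char) = b
        · subst hT
          by_cases hB : ('B':Char) = c
          · subst hB
            simp [pvBLoop, pvCands0, List.filter, List.cons_prefix_cons, List.prefix_nil]
          · have hB' : (('B':Char) == c) = false := by simp [hB]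
            simp [pvBLoop, pvCands0, List.filter, List.cons_prefix_cons, List.prefix_nil, hB, hB']
        · have hT' : (('T':Char) == b) = false := by simp [hT]
          simp [pvBLoop, pvCands0, List.filter, List.cons_prefix_cons, List.prefix_nil, hT, hT']
      · have hC' : (('C':Char) == a) = false := by simp [hC]
        by_cases hH : ('H':Char) = a
        · subst hH
          by_cases hT : ('T':Char) = b
          · subst hT
            by_cases hE : ('E':Char) = c
            · subst hE
              simp [pvBLoop, pvCands0, List.filter, List.cons_prefix_cons, List.prefix_nil]
            · have hE' : (('E':Char) == c) = false := by simp [hE]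
              simp [pvBLoop, pvCands0, List.filter, List.cons_prefix_cons, List.prefix_nil, hE, hE']
          · have hT' : (('T':Char) == b) = false := by simp [hT]
            simp [pvBLoop, pvCands0, List.filter, List.cons_prefix_cons, List.prefix_nil, hT, hT']
        · have hH' : (('H':Char) == a) = false := by simp [hH]
          by_cases hB : ('B':Char) = a
          · subst hB
            by_cases hN : ('N':Char) = b
            · subst hN
              by_cases hB2 : ('B':Char) = c
              · subst hB2
                simp [pvBLoop, pvCands0, List.filter, List.cons_prefix_cons, List.prefix_nil]
              · have hB2' : (('B':Char) == c) = false := by simp [hB2]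
                simp [pvBLoop, pvCands0, List.filter, List.cons_prefix_cons, List.prefix_nil, hB2, hB2']
            · have hN' : (('N':Char) == b) = false := by simp [hN]
              simp [pvBLoop, pvCands0, List.filter, List.cons_prefix_cons, List.prefix_nil, hN, hN']
          · have hB' : (('B':Char) == a) = false := by simp [hB]
            by_cases hT : ('T':Char) = a
            · subst hT
              by_cases hD2 : ('D':Char) = b
              · subst hD2
                by_cases hS : ('S':Char) = c
                · subst hS
                  simp [pvBLoop, pvCands0, List.filter, List.cons_prefix_cons, List.prefix_nil]
                · have hS' : (('S':Char) == c) = false := by simp [hS]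
                  simp [pvBLoop, pvCands0, List.filter, List.cons_prefix_cons, List.prefix_nil, hS, hS']
              · have hD2' : (('D':Char) == b) = false := by simp [hD2]
                simp [pvBLoop, pvCands0, List.filter, List.cons_prefix_cons, List.prefix_nil, hD2, hD2']
            · have hT' : (('T':Char) == a) = false := by simp [hT]
              simp [pvBLoop, pvCands0, List.filter, List.cons_prefix_cons, List.prefix_nil, hD, hC, hH, hB, hT, hD', hC', hH', hB', hT']
  · -- r = a :: b :: c :: d :: rest
    by_cases hT : ('T':Char) = a
    · subst hT
      by_cases hD : ('D':Char) = b
      · subst hD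
        by_cases hS : ('S':Char) = c
        · subst hS
          by_cases hU : ('U':Char) = d
          · subst hU
            simp [pvBLoop, pvCands0, List.filter, List.cons_prefix_cons]
            exact pvBLoop_stop _ _ _ _ (by decide)
          · have hU' : (('U':Char) == d) = false := by simp [hU]
            simp [pvBLoop, pvCands0, List.filter, List.cons_prefix_cons, hU, hU']
        · have hS' : (('S':Char) == c) = false := by simp [hS]
          simp [pvBLoop, pvCands0, List.filter, List.cons_prefix_cons, hS, hS']
      · have hD' : (('D':Char) == b) = false := by simp [hD]
        simp [pvBLoop, pvCands0, List.filter, List.cons_prefix_cons, hD, hD']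
    · have hT' : (('T':Char) == a) = false := by simp [hT]
      by_cases hD : ('D':Char) = a
      · subst hD
        by_cases hS : ('S':Char) = b
        · subst hS
          by_cases hU : ('U':Char) = c
          · subst hU
            by_cases hB : ('B':Char) = d
            · subst hB
              simp [pvBLoop, pvCands0, List.filter, List.cons_prefix_cons, hT, hT']
              exact pvBLoop_stop _ _ _ _ (by decide)
            · have hB' : (('B':Char) == d) = false := by simp [hB]
              simp [pvBLoop, pvCands0, List.filter, List.cons_prefix_cons, hT, hT', hB, hB']
          · have hU' : (('U':Char) == c) = false := by simp [hU]
            simp [pvBLoop, pvCands0, List.filter, List.cons_prefix_cons, hT, hT', hU, hU']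
        · have hS' : (('S':Char) == b) = false := by simp [hS]
          simp [pvBLoop, pvCands0, List.filter, List.cons_prefix_cons, hT, hT', hS, hS']
      · have hD' : (('D':Char) == a) = false := by simp [hD]
        by_cases hC : ('C':Char) = a
        · subst hC
          by_cases hTb : ('T':Char) = b
          · subst hTb
            by_cases hB : ('B':Char) = c
            · subst hB
              simp [pvBLoop, pvCands0, List.filter, List.cons_prefix_cons, hT, hT']
            · have hB' : (('B':Char) == c) = false := by simp [hB]
              simp [pvBLoop, pvCands0, List.filter, List.cons_prefix_cons, hT, hT', hB, hB']
          · have hTb' : (('T':Char) == b) = false := by simp [hTb]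
            simp [pvBLoop, pvCands0, List.filter, List.cons_prefix_cons, hT, hT', hTb, hTb']
        · have hC' : (('C':Char) == a) = false := by simp [hC]
          by_cases hH : ('H':Char) = a
          · subst hH
            by_cases hTb : ('T':Char) = b
            · subst hTb
              by_cases hE : ('E':Char) = c
              · subst hE
                simp [pvBLoop, pvCands0, List.filter, List.cons_prefix_cons, hT, hT']
              · have hE' : (('E':Char) == c) = false := by simp [hE]
                simp [pvBLoop, pvCands0, List.filter, List.cons_prefix_cons, hT, hT', hE, hE']
            · have hTb' : (('T':Char) == b) = false := by simp [hTb]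
              simp [pvBLoop, pvCands0, List.filter, List.cons_prefix_cons, hT, hT', hTb, hTb']
          · have hH' : (('H':Char) == a) = false := by simp [hH]
            by_cases hB : ('B':Char) = a
            · subst hB
              by_cases hN : ('N':Char) = b
              · subst hN
                by_cases hB2 : ('B':Char) = c
                · subst hB2
                  simp [pvBLoop, pvCands0, List.filter, List.cons_prefix_cons, hT, hT']
                · have hB2' : (('B':Char) == c) = false := by simp [hB2]
                  simp [pvBLoop, pvCands0, List.filter, List.cons_prefix_cons, hT, hT', hB2, hB2']
              · have hN' : (('N':Char) == b) = false := by simp [hN]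
                simp [pvBLoop, pvCands0, List.filter, List.cons_prefix_cons, hT, hT', hN, hN']
            · have hB' : (('B':Char) == a) = false := by simp [hB]
              simp [pvBLoop, pvCands0, List.filter, List.cons_prefix_cons, hT, hD, hC, hH, hB, hT', hD', hC', hH', hB']


theorem pv_sorted_quotes :
    PySem.List.sorted ["USDT", "USD", "BTC", "ETH", "BNB", "BUSD"] (fun q => PySem.Str.len q) true
      = ["USDT", "BUSD", "USD", "BTC", "ETH", "BNB"] := by decide

theorem pv_endswith_iff (symbol q : String) :
    PySem.Str.endswith symbol q = true ↔ q.toList.reverse <+: symbol.toList.reverse := by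
  rw [PySem.Str.endswith_eq, PySem.Chars.endswith_iff, ← List.reverse_prefix]

theorem pv_tail4_eq_iff (symbol q : String) (hq : q.toList.length = 4) :
    (PySem.Str.slice symbol (some (-4)) none = q) ↔ (PySem.Str.endswith symbol q = true) := by
  rw [← String.toList_inj, PySem.Str.toList_slice, PySem.Chars.slice_eq_listSlice,
    PySem.List.slice_from_neg_ofNat _ 4 (by norm_num),
    PySem.Str.endswith_eq, PySem.Chars.endswith_iff, List.suffix_iff_eq_drop, hq]
  exact eq_comm

theorem pv_tail3_eq_iff (symbol q : String) (hq : q.toList.length = 3) :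
    (PySem.Str.slice symbol (some (-3)) none = q) ↔ (PySem.Str.endswith symbol q = true) := by
  rw [← String.toList_inj, PySem.Str.toList_slice, PySem.Chars.slice_eq_listSlice,
    PySem.List.slice_from_neg_ofNat _ 3 (by norm_num),
    PySem.Str.endswith_eq, PySem.Chars.endswith_iff, List.suffix_iff_eq_drop, hq]
  exact eq_comm


-- ===== VERDICT (by name: the statement is the Claim_ definition above) =====
theorem standardize_symbol_spec : Claim_equal_standardize_symbol := by
  intro symbol _
  unfold Spec_standardize_symbol standardize_symbol standardize_symbol_alt
  simp only [pv_sorted_quotes, pvALoop, pvBLoop_eval]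
  by_cases h1 : PySem.Str.endswith symbol "USDT" = true
  · have p1 : ['T','D','S','U'] <+: symbol.toList.reverse := (pv_endswith_iff symbol "USDT").mp h1
    have t1 : PySem.Str.slice symbol (some (-4)) none = "USDT" :=
      (pv_tail4_eq_iff symbol "USDT" (by decide)).mpr h1
    have l1 : PySem.Str.len "USDT" = 4 := by decide
    simp only [h1, p1, l1, if_pos]
    norm_num [t1]
  · have p1 : ¬ (['T','D','S','U'] <+: symbol.toList.reverse) :=
      fun hp => h1 ((pv_endswith_iff symbol "USDT").mpr hp)
    by_cases h2 : PySem.Str.endswith symbol "BUSD" = true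
    · have p2 : ['D','S','U','B'] <+: symbol.toList.reverse := (pv_endswith_iff symbol "BUSD").mp h2
      have t2 : PySem.Str.slice symbol (some (-4)) none = "BUSD" :=
        (pv_tail4_eq_iff symbol "BUSD" (by decide)).mpr h2
      have l2 : PySem.Str.len "BUSD" = 4 := by decide
      simp only [h1, h2, p1, p2, l2, if_false, if_pos, Bool.false_eq_true]
      norm_num [t2]
    · have p2 : ¬ (['D','S','U','B'] <+: symbol.toList.reverse) :=
        fun hp => h2 ((pv_endswith_iff symbol "BUSD").mpr hp)
      by_cases h3 : PySem.Str.endswith symbol "USD" = true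
      · have p3 : ['D','S','U'] <+: symbol.toList.reverse := (pv_endswith_iff symbol "USD").mp h3
        have t3 : PySem.Str.slice symbol (some (-3)) none = "USD" :=
          (pv_tail3_eq_iff symbol "USD" (by decide)).mpr h3
        have l3 : PySem.Str.len "USD" = 3 := by decide
        simp only [h1, h2, h3, p1, p2, p3, l3, if_true, Bool.false_eq_true]
        norm_num [t3]
      · have p3 : ¬ (['D','S','U'] <+: symbol.toList.reverse) :=
          fun hp => h3 ((pv_endswith_iff symbol "USD").mpr hp)
        by_cases h4 : PySem.Str.endswith symbol "BTC" = true
        · have p4 : ['C','T','B'] <+: symbol.toList.reverse := (pv_endswith_iff symbol "BTC").mp h4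
          have t4 : PySem.Str.slice symbol (some (-3)) none = "BTC" :=
            (pv_tail3_eq_iff symbol "BTC" (by decide)).mpr h4
          have l4 : PySem.Str.len "BTC" = 3 := by decide
          simp only [h1, h2, h3, h4, p1, p2, p3, p4, l4, if_true, Bool.false_eq_true]
          norm_num [t4]
        · have p4 : ¬ (['C','T','B'] <+: symbol.toList.reverse) :=
            fun hp => h4 ((pv_endswith_iff symbol "BTC").mpr hp)
          by_cases h5 : PySem.Str.endswith symbol "ETH" = true
          · have p5 : ['H','T','E'] <+: symbol.toList.reverse := (pv_endswith_iff symbol "ETH").mp h5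
            have t5 : PySem.Str.slice symbol (some (-3)) none = "ETH" :=
              (pv_tail3_eq_iff symbol "ETH" (by decide)).mpr h5
            have l5 : PySem.Str.len "ETH" = 3 := by decide
            simp only [h1, h2, h3, h4, h5, p1, p2, p3, p4, p5, l5, if_true, Bool.false_eq_true]
            norm_num [t5]
          · have p5 : ¬ (['H','T','E'] <+: symbol.toList.reverse) :=
              fun hp => h5 ((pv_endswith_iff symbol "ETH").mpr hp)
            by_cases h6 : PySem.Str.endswith symbol "BNB" = true
            · have p6 : ['B','N','B'] <+: symbol.toList.reverse := (pv_endswith_iff symbol "BNB").mp h6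
              have t6 : PySem.Str.slice symbol (some (-3)) none = "BNB" :=
                (pv_tail3_eq_iff symbol "BNB" (by decide)).mpr h6
              have l6 : PySem.Str.len "BNB" = 3 := by decide
              simp only [h1, h2, h3, h4, h5, h6, p1, p2, p3, p4, p5, p6, l6, if_true, Bool.false_eq_true]
              norm_num [t6]
            · have p6 : ¬ (['B','N','B'] <+: symbol.toList.reverse) :=
                fun hp => h6 ((pv_endswith_iff symbol "BNB").mpr hp)
              simp only [h1, h2, h3, h4, h5, h6, p1, p2, p3, p4, p5, p6, Bool.false_eq_true]
              norm_num
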